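-- pv_equiv track=rewrite | github.com/GraphicArtQuest/GraphicDocs | src/parse_docstring_functions/get_since.py | get_since
-- ===== SOURCE A (Python) =====
-- def get_since(docstring: str) -> str | None:
--     """
--         Goes through the docstring and looks for the final since value annotated by a `@since` tag.
--         If the docstring has more than one of these tags, the function will only record the last `@since` tag found.
--
--         If the tag is not included or is left blank, it will return `None`. Otherwise, it will be the provided string.
--
--         For example:
--         - `@since v1.2.2`
--             - Returns: `"v1.2.2"`
--     """
--     desc = ""
--
--     parsed = docstring.splitlines()
--
--     record_desc = False # Used as a flag to tell if in the process of recording a block of description text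
--
--     for line in parsed:
--         stripped_line = line.strip()
--
--         if stripped_line[0:6] == "@since":
--             # Start a new @since check.
--             # Only the last @since should work, so no need to check if we've already found one
--             desc = desc.strip()
--             record_desc = True
--
--             # We have encountered a new since description, start recording the info
--             desc = stripped_line[6:len(stripped_line)]
--             continue
--
--         if desc != "" and stripped_line[0:1] == "@" and record_desc:
--             # Already started parsing a since string, but now encountering a new tag
--             desc = desc.strip()
--             record_desc = False
--             continue
--
--         if desc != "" and record_desc:
--             # Have found a since tag already, and now its description has spilled on to another line
--             if stripped_line == "": # Add a paragraph break
--                 desc += "\n"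
--             elif desc[-1:] == "\n": # Do not add an extra space for new paragraphs.
--                 desc += stripped_line
--             else:
--                 desc += " " + stripped_line
--
--     if desc != "":   # If trying to .strip() the value 'None', then it will throw an error.
--         return desc.strip()
--     return None
-- ===== SOURCE B (Python) =====
-- def get_since(docstring: str) -> str | None:
--     lines = docstring.splitlines()
--
--     # Phase 1: remember the LAST line whose stripped form starts with "@since" (with its index).
--     last = None
--     for i, line in enumerate(lines):
--         if line.strip().startswith("@since"):
--             last = (i, line)
--     if last is None:
--         return None
--
--     desc = last[1].strip()[6:]
--     if desc == "":
--         return None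
--
--     # Phase 2: collect continuation lines until the next tag.
--     for line in lines[last[0] + 1:]:
--         stripped = line.strip()
--         if stripped.startswith("@"):
--             break
--         if stripped == "":
--             desc += "\n"
--         elif desc.endswith("\n"):
--             desc += stripped
--         else:
--             desc += " " + stripped
--
--     return desc.strip()
-- ===== Notes on version B (the rewrite author's own statement) =====
-- stated objective: alternative
-- what changed: Replaces A's single flag-driven state machine over all lines by a two-phase decomposition: first locate the last line whose stripped form starts with '@since', then collect only its continuation lines, breaking at the first subsequent tag line.
import Mathlib
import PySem

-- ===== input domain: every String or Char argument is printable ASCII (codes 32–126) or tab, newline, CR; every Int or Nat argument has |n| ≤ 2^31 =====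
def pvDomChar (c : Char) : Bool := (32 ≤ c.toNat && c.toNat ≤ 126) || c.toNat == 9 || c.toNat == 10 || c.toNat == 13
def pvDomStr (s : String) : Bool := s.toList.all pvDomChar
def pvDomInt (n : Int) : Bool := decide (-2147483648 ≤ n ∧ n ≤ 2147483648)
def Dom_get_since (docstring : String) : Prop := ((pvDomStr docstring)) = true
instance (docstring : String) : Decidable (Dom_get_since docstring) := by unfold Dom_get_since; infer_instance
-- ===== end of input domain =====

-- B replaces A's single flag-driven state machine by a two-phase structure (locate the last
-- @since line, then collect its continuation lines until the next tag); objective: alternative.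


-- ===== PORT A =====
-- the body of A's `for line in parsed` loop, over the state (desc, record_desc)
def get_sinceStep (st : List Char × Bool) (line : List Char) : List Char × Bool :=
  let stripped := PySem.Chars.strip line
  if PySem.Chars.slice stripped (some 0) (some 6) = "@since".toList then
    (PySem.Chars.slice stripped (some 6) (some (PySem.Chars.len stripped)), true)
  else if st.1 ≠ [] ∧ PySem.Chars.slice stripped (some 0) (some 1) = "@".toList ∧ st.2 = true then
    (PySem.Chars.strip st.1, false)
  else if st.1 ≠ [] ∧ st.2 = true then
    (if stripped = [] then st.1 ++ ['\n']
     else if PySem.Chars.slice st.1 (some (-1)) none = "\n".toList then st.1 ++ stripped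
     else st.1 ++ ' ' :: stripped, st.2)
  else st

def get_since (docstring : String) : Option String :=
  let parsed := PySem.Chars.splitlines docstring.toList
  let st := parsed.foldl get_sinceStep ([], false)
  if st.1 ≠ [] then some (String.ofList (PySem.Chars.strip st.1)) else none

-- ===== PORT B =====
-- Source B's phase-2 loop: append continuation lines to desc, break at the first tag line
def get_sinceCollect (desc : List Char) : List (List Char) → List Char
  | [] => desc
  | line :: rest =>
    let stripped := PySem.Chars.strip line
    if PySem.Chars.startswith stripped "@".toList then desc
    else if stripped = [] then get_sinceCollect (desc ++ ['\n']) rest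
    else if PySem.Chars.endswith desc "\n".toList then get_sinceCollect (desc ++ stripped) rest
    else get_sinceCollect (desc ++ ' ' :: stripped) rest

def get_since_alt (docstring : String) : Option String :=
  let lines := PySem.Chars.splitlines docstring.toList
  -- phase 1: `last = (i, line)` for the last line whose stripped form starts with "@since"
  let last := lines.zipIdx.foldl
    (fun acc p =>
      if PySem.Chars.startswith (PySem.Chars.strip p.1) "@since".toList then some ((p.2 : Int), p.1)
      else acc) none
  match last with
  | none => none
  | some (i, line) =>
    let desc := PySem.Chars.slice (PySem.Chars.strip line) (some 6) none
    if desc = [] then none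
    else some (String.ofList (PySem.Chars.strip
      (get_sinceCollect desc (PySem.List.slice lines (some (i + 1)) none))))

-- ===== PRECONDITION & SPEC =====
def Spec_get_since (docstring : String) (out : Option String) : Prop := out = get_since_alt docstring
instance (docstring : String) (out : Option String) : Decidable (Spec_get_since docstring out) := by unfold Spec_get_since; infer_instance

-- ===== CLAIM (what is proved, stated in full; the proofs are below) =====
def Claim_equal_get_since : Prop := ∀ (docstring : String), Dom_get_since docstring → Spec_get_since docstring (get_since docstring)

-- ===== LEMMAS AND PROOFS =====

-- a line "is a @since line" / "is a tag line" (conditions shared by the analysis of both ports)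
def pvSince (l : List Char) : Bool := PySem.Chars.startswith (PySem.Chars.strip l) "@since".toList
def pvTag (l : List Char) : Bool := PySem.Chars.startswith (PySem.Chars.strip l) "@".toList
-- "contains a non-whitespace character" (invariant of the desc accumulator)
def pvSolid (d : List Char) : Prop := ∃ c ∈ d, PySem.Chars.isspace c = false

theorem pv_take_eq_iff_prefix (s p : List Char) (n : Nat) (hp : p.length = n) :
    (s.take n = p) ↔ p <+: s := by
  subst hp
  constructor
  · intro h
    refine ⟨s.drop p.length, ?_⟩
    conv_rhs => rw [← List.take_append_drop p.length s]
    rw [h]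
  · intro h; exact (List.prefix_iff_eq_take.1 h).symm

theorem pv_sliceA_since (s : List Char) :
    (PySem.Chars.slice s (some 0) (some 6) = "@since".toList) ↔
      PySem.Chars.startswith s "@since".toList = true := by
  have := PySem.List.slice_natCast s 0 6
  simp only [PySem.Chars.slice_eq_listSlice]
  rw [show ((0:Int) = ((0:Nat):Int)) from rfl, show ((6:Int) = ((6:Nat):Int)) from rfl, this]
  simp only [List.drop_zero, Nat.sub_zero]
  rw [pv_take_eq_iff_prefix s _ 6 (by decide)]
  simp [PySem.Chars.startswith, List.isPrefixOf_iff_prefix]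

theorem pv_sliceA_tag (s : List Char) :
    (PySem.Chars.slice s (some 0) (some 1) = "@".toList) ↔
      PySem.Chars.startswith s "@".toList = true := by
  have := PySem.List.slice_natCast s 0 1
  simp only [PySem.Chars.slice_eq_listSlice]
  rw [show ((0:Int) = ((0:Nat):Int)) from rfl, show ((1:Int) = ((1:Nat):Int)) from rfl, this]
  simp only [List.drop_zero, Nat.sub_zero]
  rw [pv_take_eq_iff_prefix s _ 1 (by decide)]
  simp [PySem.Chars.startswith, List.isPrefixOf_iff_prefix]

theorem pv_endswith_nl (d : List Char) :
    PySem.Chars.endswith d "\n".toList = true ↔ d.getLast? = some '\n' := by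
  simp only [PySem.Chars.endswith, List.isSuffixOf_iff_suffix]
  constructor
  · rintro ⟨t, rfl⟩; exact List.getLast?_concat
  · intro h
    obtain ⟨ys, rfl⟩ := List.getLast?_eq_some_iff.1 h
    exact ⟨ys, rfl⟩

theorem pv_sliceA_nl (d : List Char) :
    (PySem.Chars.slice d (some (-1)) none = "\n".toList) ↔
      PySem.Chars.endswith d "\n".toList = true := by
  rcases List.eq_nil_or_concat d with rfl | ⟨xs, x, hd⟩
  · constructor
    · intro h; simp [PySem.List.slice] at h
    · intro h; rw [pv_endswith_nl] at h; simp at h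
  · rw [List.concat_eq_append] at hd; subst hd
    have h1 : PySem.Chars.slice (xs ++ [x]) (some (-1)) none = [x] := by
      simp [PySem.List.slice]
    rw [h1, pv_endswith_nl, List.getLast?_concat,
      show "\n".toList = ['\n'] from rfl]
    constructor
    · intro h
      simp only [List.cons.injEq, and_true] at h
      rw [h]
    · intro h
      simp only [Option.some.injEq] at h
      rw [h]

theorem pv_slice6 (s : List Char) :
    PySem.Chars.slice s (some 6) (some (PySem.Chars.len s)) = s.drop 6 := by
  rw [PySem.Chars.len_eq]
  simp only [PySem.Chars.slice_eq_listSlice]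
  rw [show ((6:Int) = ((6:Nat):Int)) from rfl, PySem.List.slice_natCast]
  rw [← List.length_drop (i := 6) (l := s), List.take_length]

theorem pv_sliceB6 (s : List Char) :
    PySem.Chars.slice s (some 6) none = s.drop 6 := by
  simp only [PySem.Chars.slice_eq_listSlice]
  rw [PySem.List.slice_from s (by norm_num : (0:Int) ≤ 6)]
  rfl

-- strip facts
theorem pv_dropWhile_idem {α : Type} (p : α → Bool) (l : List α) :
    List.dropWhile p (List.dropWhile p l) = List.dropWhile p l := by
  induction l with
  | nil => rfl
  | cons a t ih =>
    by_cases h : p a = true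
    · simp [h, ih]
    · simp [h]

theorem pv_head_not {α : Type} (p : α → Bool) (l : List α) {a : α}
    (h : (List.dropWhile p l).head? = some a) : p a = false := by
  have := List.head?_dropWhile_not p l
  rw [h] at this
  exact this

theorem pv_rstrip_prefix (t : List Char) : PySem.Chars.rstrip t <+: t := by
  unfold PySem.Chars.rstrip
  rw [← List.reverse_reverse t]
  exact List.reverse_prefix.2 (by rw [List.reverse_reverse]; exact List.dropWhile_suffix _)

theorem pv_strip_idem (s : List Char) :
    PySem.Chars.strip (PySem.Chars.strip s) = PySem.Chars.strip s := by
  unfold PySem.Chars.strip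
  have h1 : PySem.Chars.lstrip (PySem.Chars.rstrip (PySem.Chars.lstrip s))
      = PySem.Chars.rstrip (PySem.Chars.lstrip s) := by
    rcases hr : PySem.Chars.rstrip (PySem.Chars.lstrip s) with _ | ⟨a, rest⟩
    · rfl
    · have hpre : a :: rest <+: PySem.Chars.lstrip s := hr ▸ pv_rstrip_prefix (PySem.Chars.lstrip s)
      obtain ⟨r, hr2⟩ := hpre
      have hta : (PySem.Chars.lstrip s).head? = some a := by rw [← hr2]; rfl
      have hpa : PySem.Chars.isspace a = false := pv_head_not _ s hta
      simp [PySem.Chars.lstrip, hpa]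
  rw [h1]
  unfold PySem.Chars.rstrip
  rw [List.reverse_reverse, pv_dropWhile_idem]

theorem pv_strip_ne_nil (d : List Char) (h : pvSolid d) : PySem.Chars.strip d ≠ [] := by
  intro hnil
  obtain ⟨c, hc, hcs⟩ := h
  have h2 : List.dropWhile PySem.Chars.isspace (PySem.Chars.lstrip d).reverse = [] := by
    have := congrArg List.reverse hnil
    simpa [PySem.Chars.strip, PySem.Chars.rstrip] using this
  have hall : ∀ x ∈ PySem.Chars.lstrip d, PySem.Chars.isspace x = true := by
    intro x hx
    exact List.dropWhile_eq_nil_iff.1 h2 x (List.mem_reverse.2 hx)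
  rw [← List.takeWhile_append_dropWhile (p := PySem.Chars.isspace) (l := d)] at hc
  rcases List.mem_append.1 hc with hc | hc
  · rw [List.mem_takeWhile_imp hc] at hcs; cases hcs
  · rw [hall c hc] at hcs; cases hcs

theorem pv_strip_getLast_not_space (l : List Char) {a : Char}
    (h : (PySem.Chars.strip l).getLast? = some a) : PySem.Chars.isspace a = false := by
  apply pv_head_not PySem.Chars.isspace (PySem.Chars.lstrip l).reverse
  rw [← List.getLast?_reverse]
  simpa [PySem.Chars.strip, PySem.Chars.rstrip] using h

theorem pv_solid_drop6 (l : List Char) (h : (PySem.Chars.strip l).drop 6 ≠ []) :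
    pvSolid ((PySem.Chars.strip l).drop 6) := by
  obtain ⟨a, ha⟩ : ∃ a, ((PySem.Chars.strip l).drop 6).getLast? = some a :=
    ⟨_, List.getLast?_eq_some_getLast h⟩
  have hg2 : (PySem.Chars.strip l).getLast? = some a := by
    conv_lhs => rw [← List.take_append_drop 6 (PySem.Chars.strip l)]
    rw [List.getLast?_append_of_ne_nil _ h, ha]
  exact ⟨a, List.mem_of_getLast? ha, pv_strip_getLast_not_space l hg2⟩

theorem pv_solid_append (d x : List Char) (h : pvSolid d) : pvSolid (d ++ x) := by
  rcases h with ⟨c, hc, hcs⟩; exact ⟨c, List.mem_append_left _ hc, hcs⟩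

-- A's step on the three kinds of line
theorem pv_stepA_since (st : List Char × Bool) (l : List Char) (h : pvSince l = true) :
    get_sinceStep st l = ((PySem.Chars.strip l).drop 6, true) := by
  simp only [get_sinceStep]
  rw [if_pos ((pv_sliceA_since _).2 h), pv_slice6]

theorem pv_stepA_dead (st : List Char × Bool) (l : List Char)
    (h : pvSince l = false) (hst : st.1 = [] ∨ st.2 = false) :
    get_sinceStep st l = st := by
  simp only [get_sinceStep]
  rw [if_neg (fun hc => by
    have h3 : pvSince l = true := (pv_sliceA_since _).1 hc
    rw [h3] at h; simp at h)]
  rw [if_neg (fun hc => by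
    rcases hst with h1 | h1
    · exact hc.1 h1
    · rw [h1] at hc; cases hc.2.2)]
  rw [if_neg (fun hc => by
    rcases hst with h1 | h1
    · exact hc.1 h1
    · rw [h1] at hc; cases hc.2)]

-- folds over since-free line lists
theorem pv_foldA_dead (L : List (List Char)) (st : List Char × Bool)
    (hL : ∀ l ∈ L, pvSince l = false) (hst : st.1 = [] ∨ st.2 = false) :
    L.foldl get_sinceStep st = st := by
  induction L with
  | nil => rfl
  | cons l rest ih =>
    simp only [List.foldl_cons]
    rw [pv_stepA_dead st l (hL l (.head rest)) hst]
    exact ih (fun x hx => hL x (.tail l hx))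

-- main collection lemma: A's recording phase equals B's collect phase
theorem pv_foldA_collect (L : List (List Char)) (d : List Char)
    (hL : ∀ l ∈ L, pvSince l = false) (hd : d ≠ []) (hs : pvSolid d) :
    (if (L.foldl get_sinceStep (d, true)).1 ≠ [] then
       some (String.ofList (PySem.Chars.strip (L.foldl get_sinceStep (d, true)).1)) else none)
      = some (String.ofList (PySem.Chars.strip (get_sinceCollect d L))) := by
  induction L generalizing d with
  | nil => simp only [List.foldl_nil, get_sinceCollect]; rw [if_pos hd]
  | cons l rest ih =>
    have hsl : pvSince l = false := hL l (.head rest)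
    have hrest : ∀ x ∈ rest, pvSince x = false := fun x hx => hL x (.tail l hx)
    have hnot6 : ¬ (PySem.Chars.slice (PySem.Chars.strip l) (some 0) (some 6) = "@since".toList) :=
      fun hc => by
        have h3 : pvSince l = true := (pv_sliceA_since _).1 hc
        rw [h3] at hsl; simp at hsl
    by_cases htag : pvTag l = true
    · have hstep : get_sinceStep (d, true) l = (PySem.Chars.strip d, false) := by
        simp only [get_sinceStep]
        rw [if_neg hnot6, if_pos ⟨hd, (pv_sliceA_tag _).2 htag, by trivial⟩]
      have hcol : get_sinceCollect d (l :: rest) = d := by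
        simp only [get_sinceCollect]
        rw [if_pos (show PySem.Chars.startswith (PySem.Chars.strip l) "@".toList = true from htag)]
      simp only [List.foldl_cons, hstep, hcol]
      rw [pv_foldA_dead rest _ hrest (.inr rfl)]
      have hne : PySem.Chars.strip d ≠ [] := pv_strip_ne_nil d hs
      rw [if_pos hne, pv_strip_idem]
    · have htag' : ¬ (PySem.Chars.startswith (PySem.Chars.strip l) "@".toList = true) := htag
      have hstep : get_sinceStep (d, true) l =
          ((if PySem.Chars.strip l = [] then d ++ ['\n']
            else if PySem.Chars.endswith d "\n".toList = true then d ++ PySem.Chars.strip l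
            else d ++ ' ' :: PySem.Chars.strip l), true) := by
        simp only [get_sinceStep]
        rw [if_neg hnot6,
          if_neg (fun hc => htag' ((pv_sliceA_tag _).1 hc.2.1)),
          if_pos ⟨hd, by trivial⟩]
        congr 1
        split_ifs with h0 h1 h2 h2
        · rfl
        · rfl
        · exact absurd ((pv_sliceA_nl d).1 h1) h2
        · exact absurd ((pv_sliceA_nl d).2 h2) h1
        · rfl
      simp only [List.foldl_cons, hstep]
      conv_rhs => rw [show get_sinceCollect d (l :: rest)
          = (if PySem.Chars.strip l = [] then get_sinceCollect (d ++ ['\n']) rest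
             else if PySem.Chars.endswith d "\n".toList = true then
               get_sinceCollect (d ++ PySem.Chars.strip l) rest
             else get_sinceCollect (d ++ ' ' :: PySem.Chars.strip l) rest) from by
        simp only [get_sinceCollect]; rw [if_neg htag']]
      by_cases h0 : PySem.Chars.strip l = []
      · rw [if_pos h0, if_pos h0]
        exact ih (d ++ ['\n']) hrest (by simp) (pv_solid_append d _ hs)
      · rw [if_neg h0, if_neg h0]
        by_cases h1 : PySem.Chars.endswith d "\n".toList = true
        · rw [if_pos h1, if_pos h1]
          exact ih (d ++ PySem.Chars.strip l) hrest (by simp [hd]) (pv_solid_append d _ hs)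
        · rw [if_neg h1, if_neg h1]
          exact ih (d ++ ' ' :: PySem.Chars.strip l) hrest (by simp) (pv_solid_append d _ hs)

-- B's phase-1 fold: characterisations
theorem pv_lastFold_none (L : List (List Char)) (n : Nat)
    (hL : ∀ l ∈ L, pvSince l = false) (acc : Option (Int × List Char)) :
    (L.zipIdx n).foldl
      (fun acc p => if pvSince p.1 = true then some ((p.2 : Int), p.1) else acc) acc = acc := by
  induction L generalizing n acc with
  | nil => rfl
  | cons l rest ih =>
    simp only [List.zipIdx_cons, List.foldl_cons, hL l (.head rest)]
    simpa using ih (n + 1) (fun x hx => hL x (.tail l hx)) acc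

theorem pv_lastFold_split (L1 L2 : List (List Char)) (l0 : List Char) (n : Nat)
    (h0 : pvSince l0 = true) (h2 : ∀ l ∈ L2, pvSince l = false)
    (acc : Option (Int × List Char)) :
    ((L1 ++ l0 :: L2).zipIdx n).foldl
      (fun acc p => if pvSince p.1 = true then some ((p.2 : Int), p.1) else acc) acc
      = some (((n + L1.length : Nat) : Int), l0) := by
  rw [List.zipIdx_append, List.foldl_append]
  simp only [List.zipIdx_cons, List.foldl_cons, h0, if_pos]
  exact pv_lastFold_none L2 _ h2 _

-- every list of lines either has no @since line or splits around its last one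
theorem pv_split (L : List (List Char)) :
    (∀ l ∈ L, pvSince l = false) ∨
      ∃ L1 l0 L2, L = L1 ++ l0 :: L2 ∧ pvSince l0 = true ∧ ∀ l ∈ L2, pvSince l = false := by
  induction L with
  | nil => exact .inl (by simp)
  | cons l rest ih =>
    rcases ih with h | ⟨L1, l0, L2, rfl, h0, h2⟩
    · by_cases hl : pvSince l = true
      · exact .inr ⟨[], l, rest, rfl, hl, h⟩
      · exact .inl (by
          intro x hx
          rcases List.mem_cons.1 hx with rfl | hx
          · exact Bool.eq_false_iff.2 hl
          · exact h x hx)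
    · exact .inr ⟨l :: L1, l0, L2, rfl, h0, h2⟩

-- the equivalence over an explicit list of lines
theorem pv_main (L : List (List Char)) :
    (if (L.foldl get_sinceStep ([], false)).1 ≠ [] then
       some (String.ofList (PySem.Chars.strip (L.foldl get_sinceStep ([], false)).1)) else none)
      = (match (L.zipIdx).foldl
            (fun acc p => if pvSince p.1 = true then some ((p.2 : Int), p.1) else acc) none with
         | none => none
         | some (i, line) =>
            let desc := PySem.Chars.slice (PySem.Chars.strip line) (some 6) none
            if desc = [] then none
            else some (String.ofList (PySem.Chars.strip
              (get_sinceCollect desc (PySem.List.slice L (some (i + 1)) none))))) := by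
  rcases pv_split L with hnone | ⟨L1, l0, L2, rfl, h0, h2⟩
  · rw [pv_foldA_dead L ([], false) hnone (.inl rfl),
      pv_lastFold_none L 0 hnone none]
    simp
  · rw [pv_lastFold_split L1 L2 l0 0 h0 h2 none]
    have hfold : ((L1 ++ l0 :: L2).foldl get_sinceStep ([], false))
        = L2.foldl get_sinceStep ((PySem.Chars.strip l0).drop 6, true) := by
      rw [List.foldl_append]
      simp only [List.foldl_cons, pv_stepA_since _ l0 h0]
    have htail : PySem.List.slice (L1 ++ l0 :: L2) (some (((0 + L1.length : Nat) : Int) + 1)) none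
        = L2 := by
      rw [show (((0 + L1.length : Nat) : Int) + 1) = ((L1.length + 1 : Nat) : Int) by push_cast; ring]
      rw [PySem.List.slice_from _ (by positivity), Int.toNat_natCast]
      rw [List.drop_append]
      rw [List.drop_eq_nil_of_le (by omega)]
      simp
    have hdesc : PySem.Chars.slice (PySem.Chars.strip l0) (some 6) none
        = (PySem.Chars.strip l0).drop 6 := pv_sliceB6 _
    simp only [hfold, htail, hdesc]
    by_cases hd0 : (PySem.Chars.strip l0).drop 6 = []
    · rw [hd0, pv_foldA_dead L2 ([], true) h2 (.inl rfl)]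
      simp
    · rw [pv_foldA_collect L2 _ h2 hd0 (pv_solid_drop6 l0 hd0)]
      simp [hd0]

-- ===== VERDICT (by name: the statement is the Claim_ definition above) =====
theorem get_since_spec : Claim_equal_get_since := by
  intro docstring _
  unfold Spec_get_since
  have h := pv_main (PySem.Chars.splitlines docstring.toList)
  simp only [pvSince] at h
  exact h
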